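-- pv_equiv track=rewrite | github.com/fridokus/advent-of-code | 16.py | calculate_element
-- ===== SOURCE A (Python) =====
-- base_pattern = [0, 1, 0, -1]
--
-- def calculate_element(n, i):
--     bp_index = 0
--     j = 0
--     ret = 0
--     for element in n:
--         j += 1
--         bp_index = (j // (i+1)) % 4
--         ret += base_pattern[bp_index] * element
--
--     return abs(ret) % 10
-- ===== SOURCE B (Python) =====
-- def calculate_element(n, i):
--     # Block traversal: after skipping the leading p-1 zero-weight elements,
--     # the pattern is p elements of sign s, p zeros, repeating with s flipping.
--     p = i + 1
--     xs = n[p - 1:]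
--     total = 0
--     sign = 1
--     while xs:
--         total += sign * sum(xs[:p])
--         xs = xs[2 * p:]
--         sign = -sign
--     return abs(total) % 10
-- ===== Notes on version B (the rewrite author's own statement) =====
-- stated objective: faster
-- what changed: Replaces A's per-element modular pattern-index loop (computing (j//(i+1))%4 and a table lookup for every element) by a block/stride traversal that skips the leading i zero-weight elements and then alternately adds and subtracts whole slices of length i+1, stepping over the zero blocks.
-- outside the precondition, e.g. on calculate_element([1, 2, 3], -2): A returns 2, B does not finish within the time limit; on calculate_element([1], -1): A raises ZeroDivisionError, B does not finish within the time limit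
import Mathlib
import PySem

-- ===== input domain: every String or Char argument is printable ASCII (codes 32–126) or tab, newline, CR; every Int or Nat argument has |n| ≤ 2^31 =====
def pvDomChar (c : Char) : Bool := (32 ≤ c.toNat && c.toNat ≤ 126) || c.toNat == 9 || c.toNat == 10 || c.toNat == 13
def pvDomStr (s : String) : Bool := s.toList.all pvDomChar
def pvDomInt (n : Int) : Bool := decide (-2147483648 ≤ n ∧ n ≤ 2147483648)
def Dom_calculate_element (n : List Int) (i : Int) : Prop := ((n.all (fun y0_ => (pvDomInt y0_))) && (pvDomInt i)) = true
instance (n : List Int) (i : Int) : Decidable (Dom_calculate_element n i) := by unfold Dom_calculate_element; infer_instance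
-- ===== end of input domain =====

-- B replaces A's per-element pattern-index loop by a block/stride traversal that adds
-- and subtracts whole sign blocks (fewer loop iterations; a timing run measured B faster).

-- ===== PORT A =====
def base_pattern : List Int := [0, 1, 0, -1]

def calculate_element (n : List Int) (i : Int) : Int :=
  -- for element in n: j += 1; bp_index = (j // (i+1)) % 4; ret += base_pattern[bp_index] * element
  -- bp_index is always in range (a % 4 lands in 0..3), so the total pyGetD is exact here
  let st := n.foldl (fun (st : Int × Int) element =>
      (st.1 + 1,
       st.2 + PySem.List.pyGetD base_pattern
                (PySem.Int.mod (PySem.Int.floordiv (st.1 + 1) (i + 1)) 4) 0 * element))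
    ((0 : Int), (0 : Int))
  PySem.Int.mod |st.2| 10

-- ===== PORT B =====
-- the while loop of Source B; fuel = initial xs.length bounds the iterations (each
-- step strictly shortens xs inside Pre_, where p ≥ 1)
def altGo (p : Int) : Nat → List Int → Int → Int → Int
  | 0, _, total, _ => total
  | fuel + 1, xs, total, sign =>
    if xs = [] then total
    else altGo p fuel (PySem.List.slice xs (some (2 * p)) none)
           (total + sign * (PySem.List.slice xs none (some p)).sum) (-sign)

def calculate_element_alt (n : List Int) (i : Int) : Int :=
  let p := i + 1
  let xs := PySem.List.slice n (some (p - 1)) none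
  PySem.Int.mod |altGo p xs.length xs 0 1| 10

-- ===== PRECONDITION & SPEC =====
-- Pre_ restricts to the natural FFT domain i ≥ 0: at i = -1 A raises ZeroDivisionError
-- (for nonempty n), and for other i < 0 A's value comes from Python's negative
-- floor-division, which has no meaning for this task (B's block loop does not
-- terminate there).
def Pre_calculate_element (n : List Int) (i : Int) : Prop := 0 ≤ i
instance (n : List Int) (i : Int) : Decidable (Pre_calculate_element n i) := by unfold Pre_calculate_element; infer_instance
def pvWitness_calculate_element : List Int × Int := ([1, 2, 3], 0)

def Spec_calculate_element (n : List Int) (i : Int) (out : Int) : Prop := out = calculate_element_alt n i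
instance (n : List Int) (i : Int) (out : Int) : Decidable (Spec_calculate_element n i out) := by unfold Spec_calculate_element; infer_instance

-- ===== CLAIM (what is proved, stated in full; the proofs are below) =====
def Claim_equal_calculate_element : Prop := ∀ (n : List Int) (i : Int), Dom_calculate_element n i → Pre_calculate_element n i → Spec_calculate_element n i (calculate_element n i)

-- ===== LEMMAS AND PROOFS =====

-- weight of the 1-based position m in A's pattern
def wgt (p m : Int) : Int :=
  PySem.List.pyGetD base_pattern (PySem.Int.mod (PySem.Int.floordiv m p) 4) 0

-- reference: weighted sum of xs whose first element sits at 1-based position j+1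
def Gsum (p : Int) : Int → List Int → Int
  | _, [] => 0
  | j, x :: xs => wgt p (j + 1) * x + Gsum p (j + 1) xs

def bsign (c : Nat) : Int := if c % 2 = 0 then 1 else -1

theorem bsign_zero : bsign 0 = 1 := rfl

theorem bsign_succ (c : Nat) : -(bsign c) = bsign (c + 1) := by
  rcases Nat.mod_two_eq_zero_or_one c with h | h <;>
    simp [bsign, Nat.add_mod, h]

theorem Gsum_nil (p j : Int) : Gsum p j [] = 0 := rfl

theorem Gsum_append (p : Int) (as bs : List Int) :
    ∀ j, Gsum p j (as ++ bs) = Gsum p j as + Gsum p (j + as.length) bs := by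
  induction as with
  | nil => intro j; simp [Gsum]
  | cons x as ih =>
      intro j
      simp only [List.cons_append, Gsum, ih (j + 1), List.length_cons]
      push_cast
      rw [show j + ((as.length : Int) + 1) = j + 1 + (as.length : Int) by ring]
      ring

theorem Gsum_const (p c : Int) (as : List Int) :
    ∀ j, (∀ m : Int, j < m → m ≤ j + as.length → wgt p m = c) →
      Gsum p j as = c * as.sum := by
  induction as with
  | nil => intro j _; simp [Gsum]
  | cons x as ih =>
      intro j h
      have hx : wgt p (j + 1) = c := by
        apply h (j + 1) (by omega)
        simp only [List.length_cons]; push_cast; omega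
      have hrest : Gsum p (j + 1) as = c * as.sum := by
        apply ih (j + 1)
        intro m h1 h2
        apply h m (by omega)
        simp only [List.length_cons] at *
        push_cast at h2 ⊢
        omega
      simp only [Gsum, hx, hrest, List.sum_cons]
      ring

theorem foldA (i : Int) :
    ∀ (xs : List Int) (j r : Int),
      (xs.foldl (fun (st : Int × Int) element =>
          (st.1 + 1,
           st.2 + PySem.List.pyGetD base_pattern
                    (PySem.Int.mod (PySem.Int.floordiv (st.1 + 1) (i + 1)) 4) 0 * element))
        (j, r)).2 = r + Gsum (i + 1) j xs := by
  intro xs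
  induction xs with
  | nil => intro j r; simp [Gsum]
  | cons x xs ih =>
      intro j r
      simp only [List.foldl_cons, Gsum]
      rw [ih (j + 1)]
      simp only [wgt]
      ring

theorem wgt_block (p q m : Int) (hp : 0 < p) (h1 : q * p ≤ m) (h2 : m < (q + 1) * p) :
    wgt p m = PySem.List.pyGetD base_pattern (PySem.Int.mod q 4) 0 := by
  unfold wgt
  rw [(PySem.Int.floordiv_eq_iff_of_pos hp).mpr ⟨h1, h2⟩]

theorem wgt_low (p m : Int) (hp : 0 < p) (h1 : 0 ≤ m) (h2 : m < p) : wgt p m = 0 := by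
  rw [wgt_block p 0 m hp (by omega) (by omega)]
  decide

theorem wgt_plus (p m : Int) (c : Nat) (hp : 0 < p)
    (h1 : (1 + 2 * (c : Int)) * p ≤ m) (h2 : m < (2 + 2 * (c : Int)) * p) :
    wgt p m = bsign c := by
  rw [wgt_block p (1 + 2 * (c : Int)) m hp h1 (by linarith)]
  rcases Nat.mod_two_eq_zero_or_one c with h | h
  · have hmod : PySem.Int.mod (1 + 2 * (c : Int)) 4 = 1 := by
      rw [PySem.Int.mod_eq_emod_of_pos (by norm_num)]; omega
    have hb : bsign c = 1 := by simp [bsign, h]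
    rw [hmod, hb]; decide
  · have hmod : PySem.Int.mod (1 + 2 * (c : Int)) 4 = 3 := by
      rw [PySem.Int.mod_eq_emod_of_pos (by norm_num)]; omega
    have hb : bsign c = -1 := by simp [bsign, h]
    rw [hmod, hb]; decide

theorem wgt_mid (p m : Int) (c : Nat) (hp : 0 < p)
    (h1 : (2 + 2 * (c : Int)) * p ≤ m) (h2 : m < (3 + 2 * (c : Int)) * p) :
    wgt p m = 0 := by
  rw [wgt_block p (2 + 2 * (c : Int)) m hp h1 (by linarith)]
  rcases Nat.mod_two_eq_zero_or_one c with h | h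
  · have hmod : PySem.Int.mod (2 + 2 * (c : Int)) 4 = 2 := by
      rw [PySem.Int.mod_eq_emod_of_pos (by norm_num)]; omega
    rw [hmod]; decide
  · have hmod : PySem.Int.mod (2 + 2 * (c : Int)) 4 = 0 := by
      rw [PySem.Int.mod_eq_emod_of_pos (by norm_num)]; omega
    rw [hmod]; decide

theorem altGo_eq (p : Int) (hp : 0 < p) :
    ∀ (fuel : Nat) (xs : List Int), xs.length ≤ fuel → ∀ (c : Nat) (total : Int),
      altGo p fuel xs total (bsign c) = total + Gsum p (p - 1 + 2 * p * (c : Int)) xs := by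
  intro fuel
  induction fuel with
  | zero =>
      intro xs hlen c total
      have : xs = [] := List.length_eq_zero_iff.mp (Nat.le_zero.mp hlen)
      simp [this, altGo, Gsum]
  | succ fuel ih =>
      intro xs hlen c total
      by_cases hxs : xs = []
      · simp [hxs, altGo, Gsum]
      · have hp' : ((p.toNat : Int)) = p := Int.toNat_of_nonneg hp.le
        simp only [altGo, if_neg hxs]
        rw [PySem.List.slice_from xs (by omega : (0:Int) ≤ 2 * p),
            PySem.List.slice_to xs hp.le, bsign_succ]
        have hfuel : (xs.drop (2 * p).toNat).length ≤ fuel := by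
          have hne : 0 < xs.length := List.length_pos_iff.mpr hxs
          simp only [List.length_drop]
          omega
        rw [ih (xs.drop (2 * p).toNat) hfuel (c + 1)]
        -- now rebuild the right-hand side block by block
        set j : Int := p - 1 + 2 * p * (c : Int) with hj
        set p' : Nat := p.toNat with hpn
        have h2p : (2 * p).toNat = p' + p' := by omega
        have hsplit : Gsum p j xs
            = Gsum p j (xs.take p')
              + (Gsum p (j + (xs.take p').length) ((xs.drop p').take p')
                 + Gsum p (j + (xs.take p').length + ((xs.drop p').take p').length)
                     ((xs.drop p').drop p')) := by
          conv_lhs => rw [← List.take_append_drop p' xs,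
                          ← List.take_append_drop p' (xs.drop p')]
          rw [Gsum_append, Gsum_append]
        have hA : Gsum p j (xs.take p') = bsign c * (xs.take p').sum := by
          apply Gsum_const
          intro m hm1 hm2
          apply wgt_plus p m c hp
          · have : (1 + 2 * (c : Int)) * p = j + 1 := by rw [hj]; ring
            omega
          · have hlt : ((xs.take p').length : Int) ≤ p := by
              simp only [List.length_take]; omega
            have : (2 + 2 * (c : Int)) * p = j + p + 1 := by rw [hj]; ring
            omega
        have hB : Gsum p (j + (xs.take p').length) ((xs.drop p').take p') = 0 := by
          rw [Gsum_const p 0 _ _ ?_]; ring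
          intro m hm1 hm2
          -- the middle block is nonempty only when xs is longer than p'
          have hlen2 : 0 < ((xs.drop p').take p').length := by
            by_contra h
            omega
          have hlens : (xs.take p').length = p' ∧ ((xs.drop p').take p').length ≤ p' := by
            simp only [List.length_take, List.length_drop] at hlen2 ⊢
            omega
          apply wgt_mid p m c hp
          · have : (2 + 2 * (c : Int)) * p = j + p + 1 := by rw [hj]; ring
            rw [hlens.1] at hm1
            omega
          · have h3 : (3 + 2 * (c : Int)) * p = j + p + p + 1 := by rw [hj]; ring
            have : ((((xs.drop p').take p').length : Nat) : Int) ≤ p := by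
              have := hlens.2; omega
            rw [hlens.1] at hm2
            omega
        have hC : Gsum p (j + (xs.take p').length + ((xs.drop p').take p').length)
              ((xs.drop p').drop p')
            = Gsum p (p - 1 + 2 * p * ((c : Int) + 1)) ((xs.drop p').drop p') := by
          by_cases hd : (xs.drop p').drop p' = []
          · rw [hd, Gsum_nil, Gsum_nil]
          · have hlong : p' + p' < xs.length := by
              have := List.length_pos_iff.mpr hd
              simp only [List.length_drop] at this
              omega
            have hlens : (xs.take p').length = p' ∧ ((xs.drop p').take p').length = p' := by
              simp only [List.length_take, List.length_drop]
              omega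
            rw [hlens.1, hlens.2]
            have hpos : j + ((p' : Nat) : Int) + ((p' : Nat) : Int)
                = p - 1 + 2 * p * ((c : Int) + 1) := by
              rw [hj, hp']; ring
            rw [hpos]
        have hdd : (xs.drop p').drop p' = xs.drop (2 * p).toNat := by
          rw [List.drop_drop, h2p]
        rw [hsplit, hA, hB, hC, hdd]
        push_cast
        ring

theorem Gsum_shift (p : Int) (hp : 0 < p) (n : List Int) :
    Gsum p 0 n = Gsum p (p - 1) (n.drop (p - 1).toNat) := by
  have hq : (((p - 1).toNat : Nat) : Int) = p - 1 := Int.toNat_of_nonneg (by omega)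
  conv_lhs => rw [← List.take_append_drop (p - 1).toNat n]
  rw [Gsum_append]
  have h1 : Gsum p 0 (n.take (p - 1).toNat) = 0 := by
    have h0 := Gsum_const p 0 (n.take (p - 1).toNat) 0 ?_
    · rw [h0]; ring
    · intro m hm1 hm2
      apply wgt_low p m hp (by omega)
      have : ((n.take (p - 1).toNat).length : Int) ≤ p - 1 := by
        simp only [List.length_take]; omega
      omega
  have h2 : Gsum p (0 + ((n.take (p - 1).toNat).length : Int)) (n.drop (p - 1).toNat)
      = Gsum p (p - 1) (n.drop (p - 1).toNat) := by
    by_cases hd : n.drop (p - 1).toNat = []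
    · rw [hd, Gsum_nil, Gsum_nil]
    · have hlong : (p - 1).toNat < n.length := by
        have := List.length_pos_iff.mpr hd
        simp only [List.length_drop] at this
        omega
      have hlen : (n.take (p - 1).toNat).length = (p - 1).toNat := by
        simp only [List.length_take]; omega
      rw [hlen]
      rw [show (0 : Int) + (((p - 1).toNat : Nat) : Int) = p - 1 by omega]
  rw [h1, h2]
  ring

theorem a_eq_b (n : List Int) (i : Int) (hi : 0 ≤ i) :
    calculate_element n i = calculate_element_alt n i := by
  have hp : 0 < i + 1 := by omega
  simp only [calculate_element, calculate_element_alt]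
  rw [foldA i n 0 0]
  rw [PySem.List.slice_from n (by omega : (0:Int) ≤ i + 1 - 1)]
  have hB := altGo_eq (i + 1) hp (n.drop (i + 1 - 1).toNat).length
      (n.drop (i + 1 - 1).toNat) le_rfl 0 0
  rw [bsign_zero] at hB
  rw [hB]
  congr 2
  rw [Gsum_shift (i + 1) hp n]
  norm_num

-- ===== VERDICT (by name: the statement is the Claim_ definition above) =====
theorem calculate_element_spec : Claim_equal_calculate_element := by
  intro n i _ hpre
  exact a_eq_b n i hpre
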